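-- pv_equiv track=rewrite | github.com/RIA-lab/PatchEX-Design | utils.py | map_mutated_residues
-- ===== SOURCE A (Python) =====
-- def map_mutated_residues(selected_residue_idx, mutated_residues, wt_seq):
--     mapped_seqs = []
--     for seq in mutated_residues:
--         full_seq = list(wt_seq)
--         for i, idx in enumerate(selected_residue_idx):
--             full_seq[idx] = seq[i]
--         mapped_seqs.append(''.join(full_seq))
--     return mapped_seqs
-- ===== SOURCE B (Python) =====
-- def map_mutated_residues(selected_residue_idx, mutated_residues, wt_seq):
--     n = len(wt_seq)
--     # negative indices count from the end of the sequence
--     positions = [idx if idx >= 0 else idx + n for idx in selected_residue_idx]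
--     mapped_seqs = []
--     for seq in mutated_residues:
--         pieces = []
--         prev = 0
--         for pos, res in sorted(zip(positions, seq), key=lambda p: p[0]):
--             pieces.append(wt_seq[prev:pos])
--             pieces.append(res)
--             prev = pos + 1
--         pieces.append(wt_seq[prev:])
--         mapped_seqs.append(''.join(pieces))
--     return mapped_seqs
-- ===== Notes on version B (the rewrite author's own statement) =====
-- stated objective: alternative
-- what changed: Replaces A's copy-then-overwrite of a mutable character list with sort-then-stitch: the (position, residue) pairs are sorted and the output is built by concatenating the untouched wildtype slices between consecutive mutation points; Pre_ excludes inputs where A raises IndexError (out-of-range index or too-short mutated sequence) and inputs with two selected indices denoting the same residue position, where A's value is a last-assignment-wins artefact.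
-- outside the precondition, e.g. on map_mutated_residues([0, 0], [['X', 'Y']], 'AB'): A returns ['YB'], B returns ['XYB']; on map_mutated_residues([1, -1], [['X', 'Y']], 'AB'): A returns ['AY'], B returns ['AXY']
import Mathlib
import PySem

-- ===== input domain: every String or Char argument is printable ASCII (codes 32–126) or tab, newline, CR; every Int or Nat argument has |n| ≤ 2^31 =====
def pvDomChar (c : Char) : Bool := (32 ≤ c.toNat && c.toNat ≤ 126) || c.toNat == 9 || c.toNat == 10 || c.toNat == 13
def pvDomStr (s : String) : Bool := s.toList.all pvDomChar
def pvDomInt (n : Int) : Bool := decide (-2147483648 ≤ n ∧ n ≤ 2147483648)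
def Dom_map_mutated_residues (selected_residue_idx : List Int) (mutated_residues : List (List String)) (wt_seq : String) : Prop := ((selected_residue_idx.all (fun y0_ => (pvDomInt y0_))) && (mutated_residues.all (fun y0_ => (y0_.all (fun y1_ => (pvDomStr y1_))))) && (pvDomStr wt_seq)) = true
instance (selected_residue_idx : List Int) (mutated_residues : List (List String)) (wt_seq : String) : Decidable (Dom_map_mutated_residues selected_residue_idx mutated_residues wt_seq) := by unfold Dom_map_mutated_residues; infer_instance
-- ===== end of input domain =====

-- B replaces A's copy-then-overwrite of a mutable character list by sort-then-stitch:
-- sort the (position, residue) pairs and concatenate the untouched wildtype slices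
-- between consecutive mutation points (alternative algorithm, return value only).

-- ===== PORT A =====
def map_mutated_residues (selected_residue_idx : List Int) (mutated_residues : List (List String)) (wt_seq : String) : List String :=
  mutated_residues.foldl (fun mapped_seqs seq =>
    let full_seq := (PySem.List.enumerate selected_residue_idx).foldl
      (fun fs p => PySem.List.pySetD fs p.2 ((PySem.List.pyGet? seq p.1).getD ""))
      (wt_seq.toList.map (fun c => String.ofList [c]))
    mapped_seqs ++ [PySem.Str.join "" full_seq]) []

-- ===== PORT B =====
def map_mutated_residues_alt (selected_residue_idx : List Int) (mutated_residues : List (List String)) (wt_seq : String) : List String :=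
  let n : Int := PySem.Str.len wt_seq
  let positions := selected_residue_idx.map (fun idx => if 0 ≤ idx then idx else idx + n)
  mutated_residues.foldl (fun mapped_seqs seq =>
    let r := (PySem.List.sorted (positions.zip seq) (fun p => p.1) false).foldl
      (fun (st : List String × Int) pr =>
        (st.1 ++ [PySem.Str.slice wt_seq (some st.2) (some pr.1), pr.2], pr.1 + 1))
      ([], 0)
    mapped_seqs ++ [PySem.Str.join "" (r.1 ++ [PySem.Str.slice wt_seq (some r.2) none])]) []

-- ===== PRECONDITION & SPEC =====
-- Pre_ excludes exactly (a) the inputs where A raises IndexError (a selected index out of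
-- range of wt_seq, or a mutated sequence shorter than the selected-index list) and (b) the
-- inputs where two selected indices denote the same residue position, where A's value is a
-- last-assignment-wins artefact of its in-place overwrites (a defensible corner either way).
def Pre_map_mutated_residues (selected_residue_idx : List Int) (mutated_residues : List (List String)) (wt_seq : String) : Prop :=
  ∀ seq ∈ mutated_residues,
    (∀ idx ∈ selected_residue_idx, -(wt_seq.toList.length : Int) ≤ idx ∧ idx < (wt_seq.toList.length : Int)) ∧
    selected_residue_idx.length ≤ seq.length ∧
    (selected_residue_idx.map (fun idx => if 0 ≤ idx then idx else idx + (wt_seq.toList.length : Int))).Pairwise (· ≠ ·)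
instance (selected_residue_idx : List Int) (mutated_residues : List (List String)) (wt_seq : String) : Decidable (Pre_map_mutated_residues selected_residue_idx mutated_residues wt_seq) := by unfold Pre_map_mutated_residues; infer_instance

def pvWitness_map_mutated_residues : List Int × List (List String) × String := ([0, -1], [["X", "Y"], ["Q", "R"]], "ABC")

def Spec_map_mutated_residues (selected_residue_idx : List Int) (mutated_residues : List (List String)) (wt_seq : String) (out : List String) : Prop := out = map_mutated_residues_alt selected_residue_idx mutated_residues wt_seq
instance (selected_residue_idx : List Int) (mutated_residues : List (List String)) (wt_seq : String) (out : List String) : Decidable (Spec_map_mutated_residues selected_residue_idx mutated_residues wt_seq out) := by unfold Spec_map_mutated_residues; infer_instance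

-- ===== CLAIM (what is proved, stated in full; the proofs are below) =====
def Claim_equal_map_mutated_residues : Prop := ∀ (selected_residue_idx : List Int) (mutated_residues : List (List String)) (wt_seq : String), Dom_map_mutated_residues selected_residue_idx mutated_residues wt_seq → Pre_map_mutated_residues selected_residue_idx mutated_residues wt_seq → Spec_map_mutated_residues selected_residue_idx mutated_residues wt_seq (map_mutated_residues selected_residue_idx mutated_residues wt_seq)

-- ===== LEMMAS AND PROOFS =====

-- proof-side vocabulary: pvFlat = all characters of a list of strings; pvApply = A's
-- in-place writes on normalized Nat positions; pvRender = the stitched result.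
def pvFlat (L : List String) : List Char := (L.map String.toList).flatten
def pvApply (qs : List (Nat × String)) (l : List String) : List String :=
  qs.foldl (fun l q => l.set q.1 q.2) l
def pvRender (wtl : List Char) : List (Int × String) → Nat → List Char
  | [], prev => wtl.drop prev
  | p :: tl, prev => ((wtl.drop prev).take (p.1.toNat - prev)) ++ p.2.toList ++ pvRender wtl tl (p.1.toNat + 1)
theorem pvApply_length (qs : List (Nat × String)) (l : List String) :
    (pvApply qs l).length = l.length := by
  induction qs generalizing l with
  | nil => rfl
  | cons q tl ih => simp only [pvApply, List.foldl_cons] at ih ⊢; rw [ih]; simp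
theorem pvApply_take (qs : List (Nat × String)) (l : List String) (m : Nat)
    (h : ∀ q ∈ qs, m ≤ q.1) : (pvApply qs l).take m = l.take m := by
  induction qs generalizing l with
  | nil => rfl
  | cons q tl ih =>
    simp only [pvApply, List.foldl_cons] at ih ⊢
    rw [ih _ (fun p hp => h p (List.mem_cons_of_mem _ hp))]
    exact List.take_set_of_le (h q List.mem_cons_self)
theorem pvApply_drop_congr (qs : List (Nat × String)) (l₁ l₂ : List String) (m : Nat)
    (hlen : l₁.length = l₂.length) (hdrop : l₁.drop m = l₂.drop m)
    (h : ∀ q ∈ qs, m ≤ q.1) : (pvApply qs l₁).drop m = (pvApply qs l₂).drop m := by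
  induction qs generalizing l₁ l₂ with
  | nil => exact hdrop
  | cons q tl ih =>
    simp only [pvApply, List.foldl_cons] at ih ⊢
    apply ih
    · simp [hlen]
    · rw [List.drop_set, List.drop_set, hdrop]
    · exact fun p hp => h p (List.mem_cons_of_mem _ hp)
theorem pvFlat_singletons (cs : List Char) :
    pvFlat (cs.map (fun c => String.ofList [c])) = cs := by
  induction cs with
  | nil => rfl
  | cons c tl ih => simp [pvFlat] at ih ⊢; exact ih

theorem pvApply_render (wtl : List Char) (ds : List (Int × String)) (prev : Nat)
    (hinc : (ds.map Prod.fst).Pairwise (· < ·))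
    (hb : ∀ p ∈ ds, (prev : Int) ≤ p.1 ∧ p.1 < (wtl.length : Int)) :
    pvFlat ((pvApply (ds.map (fun p => (p.1.toNat, p.2))) (wtl.map (fun c => String.ofList [c]))).drop prev)
      = pvRender wtl ds prev := by
  induction ds generalizing prev with
  | nil =>
    simp only [List.map_nil, pvApply, List.foldl_nil, pvRender]
    rw [← List.map_drop, pvFlat_singletons]
  | cons p tl ih =>
    obtain ⟨hp1, hp2⟩ := hb p List.mem_cons_self
    have h0 : 0 ≤ p.1 := le_trans (by omega) hp1
    set L0 := wtl.map (fun c => String.ofList [c]) with hL0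
    have hlen0 : L0.length = wtl.length := by simp [hL0]
    set P := p.1.toNat with hP
    have hPlt : P < wtl.length := by omega
    have hprevP : prev ≤ P := by omega
    have htl : ∀ q ∈ tl.map (fun p => (p.1.toNat, p.2)), P + 1 ≤ q.1 := by
      intro q hq
      rw [List.mem_map] at hq
      obtain ⟨r, hr, rfl⟩ := hq
      have := (List.pairwise_cons.mp hinc).1 r.1 (List.mem_map_of_mem hr)
      omega
    have htlb : ∀ q ∈ tl, ((P + 1 : Nat) : Int) ≤ q.1 ∧ q.1 < (wtl.length : Int) := by
      intro q hq
      have h1 := (List.pairwise_cons.mp hinc).1 q.1 (List.mem_map_of_mem hq)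
      have h2 := (hb q (List.mem_cons_of_mem _ hq)).2
      constructor <;> omega
    simp only [List.map_cons, pvApply, List.foldl_cons]
    set l' := L0.set P p.2 with hl'
    set Z := pvApply (tl.map (fun p => (p.1.toNat, p.2))) l' with hZ
    have hZlen : Z.length = wtl.length := by rw [hZ, pvApply_length]; simp [hl', hlen0]
    -- decompose Z.drop prev
    have hdec : Z.drop prev = (l'.take (P+1)).drop prev ++ Z.drop (P+1) := by
      conv_lhs => rw [← List.take_append_drop (P+1) Z]
      rw [List.drop_append, List.length_take]
      have : prev - min (P+1) Z.length = 0 := by omega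
      rw [this, List.drop_zero]
      congr 1
      rw [pvApply_take _ _ _ htl]
    -- l'.take (P+1) = L0.take P ++ [p.2]
    have hseg : l'.take (P+1) = L0.take P ++ [p.2] := by
      rw [hl', List.set_eq_take_append_cons_drop, if_pos (by omega)]
      rw [List.take_append, List.length_take]
      have h1 : min P L0.length = P := by omega
      rw [h1]
      have h2 : P + 1 - P = 1 := by omega
      rw [h2, List.take_take]
      simp
    -- tail via congr to base L0
    have htail : Z.drop (P+1) = (pvApply (tl.map (fun p => (p.1.toNat, p.2))) L0).drop (P+1) := by
      apply pvApply_drop_congr _ _ _ _ (by simp [hl']) _ htl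
      rw [hl', List.drop_set, if_pos (by omega)]
    have hfold : List.foldl (fun l q => l.set q.1 q.2) l' (tl.map (fun p => (p.1.toNat, p.2))) = Z := rfl
    rw [hfold, hdec, hseg]
    rw [List.drop_append, List.length_take]
    have hm : min P L0.length = P := by omega
    rw [hm]
    have hz : prev - P = 0 := by omega
    rw [hz, List.drop_zero]
    have ihx : pvFlat ((pvApply (tl.map (fun p => (p.1.toNat, p.2))) L0).drop (P+1)) = pvRender wtl tl (P+1) :=
      ih (P+1) (List.pairwise_cons.mp hinc).2 (by exact_mod_cast htlb)
    have hsegf : pvFlat ((L0.take P).drop prev) = (wtl.drop prev).take (P - prev) := by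
      rw [hL0, ← List.map_take, ← List.map_drop, pvFlat_singletons, List.drop_take]
    simp only [pvFlat, List.map_append, List.flatten_append] at ihx hsegf ⊢
    rw [htail, ihx, hsegf]
    simp only [pvRender, hP]
    simp

theorem pvJoin_toList (L : List String) : (PySem.Str.join "" L).toList = pvFlat L := by
  simp only [pysem, pvFlat]
  generalize L.map String.toList = Ls
  induction Ls with
  | nil => simp [pysem]
  | cons a tl ih =>
    cases tl with
    | nil => simp [pysem]
    | cons b tl2 => rw [PySem.Chars.join_cons_cons]; simp_all

theorem pvSetD_if (l : List String) (i : Int) (v : String)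
    (h1 : -(l.length : Int) ≤ i) (h2 : i < (l.length : Int)) :
    PySem.List.pySetD l i v = l.set (if 0 ≤ i then i else i + l.length).toNat v := by
  simp only [PySem.List.pySetD, PySem.List.pySet?, PySem.List.pyIdx?]
  split_ifs with h
  · simp
  · simp only [Option.map_some, Option.getD_some]
    congr 1
    omega

theorem pvFold_eq_apply (pairs : List (Int × String)) (l : List String)
    (h : ∀ p ∈ pairs, -(l.length : Int) ≤ p.1 ∧ p.1 < (l.length : Int)) :
    pairs.foldl (fun fs p => PySem.List.pySetD fs p.1 p.2) l
      = pvApply (pairs.map (fun p => ((if 0 ≤ p.1 then p.1 else p.1 + (l.length : Int)).toNat, p.2))) l := by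
  induction pairs generalizing l with
  | nil => rfl
  | cons p tl ih =>
    obtain ⟨h1, h2⟩ := h p List.mem_cons_self
    simp only [List.foldl_cons, List.map_cons, pvApply]
    rw [pvSetD_if l p.1 p.2 h1 h2]
    have hl : (l.set (if 0 ≤ p.1 then p.1 else p.1 + (l.length:Int)).toNat p.2).length = l.length := by simp
    rw [ih _ (by rw [hl]; exact fun q hq => h q (List.mem_cons_of_mem _ hq))]
    simp only [pvApply, hl]

theorem pvApply_perm (qs qs' : List (Nat × String)) (l : List String)
    (hp : qs.Perm qs') (hnd : (qs.map Prod.fst).Nodup) :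
    pvApply qs l = pvApply qs' l := by
  induction hp generalizing l with
  | nil => rfl
  | cons x _ ih =>
    simp only [pvApply, List.foldl_cons] at ih ⊢
    exact ih _ (by simp at hnd; exact hnd.2)
  | swap x y =>
    simp only [pvApply, List.foldl_cons]
    have hne : y.1 ≠ x.1 := by
      simp at hnd
      exact fun e => hnd.1.1 e
    rw [List.set_comm _ _ hne]
  | trans h12 h23 ih1 ih2 =>
    rw [ih1 _ hnd]
    exact ih2 _ (by rw [← List.Perm.nodup_iff (List.Perm.map Prod.fst h12)]; exact hnd)

theorem pvStitch_render (wt : String) (ds : List (Int × String)) (pieces : List String) (prev : Int)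
    (hprev : 0 ≤ prev) (hpos : ∀ p ∈ ds, 0 ≤ p.1) :
    pvFlat ((ds.foldl (fun (st : List String × Int) pr =>
        (st.1 ++ [PySem.Str.slice wt (some st.2) (some pr.1), pr.2], pr.1 + 1)) (pieces, prev)).1
      ++ [PySem.Str.slice wt (some ((ds.foldl (fun (st : List String × Int) pr =>
        (st.1 ++ [PySem.Str.slice wt (some st.2) (some pr.1), pr.2], pr.1 + 1)) (pieces, prev)).2)) none])
      = pvFlat pieces ++ pvRender wt.toList ds prev.toNat := by
  induction ds generalizing pieces prev with
  | nil =>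
    simp only [List.foldl_nil, pvRender, pvFlat, List.map_append, List.flatten_append]
    simp [PySem.Str.slice, PySem.List.slice_from _ hprev]
  | cons pr tl ih =>
    simp only [List.foldl_cons]
    rw [ih _ _ (by have := hpos pr List.mem_cons_self; omega)
        (fun p hp => hpos p (List.mem_cons_of_mem _ hp))]
    have h1 : 0 ≤ pr.1 := hpos pr List.mem_cons_self
    have ht : (pr.1 + 1).toNat = pr.1.toNat + 1 := by omega
    simp only [pvRender, pvFlat, List.map_append, List.flatten_append, ht]
    simp [PySem.Str.slice, PySem.List.slice_toNat _ hprev h1]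

theorem pvSeqEq (sel : List Int) (seq : List String) (wt : String)
    (hidx : ∀ idx ∈ sel, -(wt.toList.length : Int) ≤ idx ∧ idx < (wt.toList.length : Int))
    (hlen : sel.length ≤ seq.length)
    (hdist : (sel.map (fun idx => if 0 ≤ idx then idx else idx + (wt.toList.length : Int))).Pairwise (· ≠ ·)) :
    PySem.Str.join "" ((PySem.List.enumerate sel).foldl
      (fun fs p => PySem.List.pySetD fs p.2 ((PySem.List.pyGet? seq p.1).getD ""))
      (wt.toList.map (fun c => String.ofList [c])))
    = PySem.Str.join "" ((((PySem.List.sorted ((sel.map (fun idx => if 0 ≤ idx then idx else idx + PySem.Str.len wt)).zip seq) (fun p => p.1) false).foldl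
        (fun (st : List String × Int) pr =>
          (st.1 ++ [PySem.Str.slice wt (some st.2) (some pr.1), pr.2], pr.1 + 1)) ([], 0)).1)
      ++ [PySem.Str.slice wt (some (((PySem.List.sorted ((sel.map (fun idx => if 0 ≤ idx then idx else idx + PySem.Str.len wt)).zip seq) (fun p => p.1) false).foldl
        (fun (st : List String × Int) pr =>
          (st.1 ++ [PySem.Str.slice wt (some st.2) (some pr.1), pr.2], pr.1 + 1)) ([], 0)).2)) none]) := by
  apply String.toList_inj.mp
  rw [pvJoin_toList, pvJoin_toList]
  set wtl := wt.toList with hwtl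
  set n : Int := (wtl.length : Int) with hn
  have hlen' : PySem.Str.len wt = n := by rw [PySem.Str.len_eq]
  set norm : Int → Int := fun idx => if 0 ≤ idx then idx else idx + n with hnorm
  rw [hlen']
  set positions := sel.map norm with hpos
  set zs := positions.zip seq with hzs
  set L0 := wtl.map (fun c => String.ofList [c]) with hL0
  have hL0len : L0.length = wtl.length := by simp [hL0]
  -- positions bounds
  have hposb : ∀ q ∈ positions, 0 ≤ q ∧ q < n := by
    intro q hq
    rw [hpos, List.mem_map] at hq
    obtain ⟨idx, hidx', rfl⟩ := hq
    have := hidx idx hidx'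
    simp only [hnorm]
    split_ifs <;> omega
  -- A side to pvApply
  have hA : (PySem.List.enumerate sel).foldl
      (fun fs p => PySem.List.pySetD fs p.2 ((PySem.List.pyGet? seq p.1).getD "")) L0
      = pvApply (zs.map (fun p => (p.1.toNat, p.2))) L0 := by
    have h1 := pvFold_eq_apply
      ((PySem.List.enumerate sel).map (fun p => (p.2, (PySem.List.pyGet? seq p.1).getD ""))) L0 ?hb
    case hb =>
      intro p hp
      rw [List.mem_map] at hp
      obtain ⟨q, hq, rfl⟩ := hp
      rw [PySem.List.mem_enumerate_iff] at hq
      obtain ⟨k, hk, rfl⟩ := hq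
      have := hidx sel[k] (List.getElem_mem hk)
      simp only [hL0len]
      exact this
    rw [List.foldl_map] at h1
    refine Eq.trans ?_ (h1.trans ?_)
    · rfl
    congr 1
    -- zs.map natPair = pairsA.map ...
    apply List.ext_getElem
    · simp [hzs, hpos, PySem.List.length_enumerate, List.length_zip]
      omega
    · intro k hk1 hk2
      have hk : k < sel.length := by
        simp at hk1
        omega
      have hks : k < seq.length := lt_of_lt_of_le hk hlen
      simp only [List.getElem_map, hzs, List.getElem_zip, PySem.List.getElem_enumerate, hpos]
      congr 1
      · simp [hL0len, hnorm, hn]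
      · rw [show (0 : Int) + (k : Int) = ((k : Nat) : Int) by omega, PySem.List.pyGet?_natCast]
        rw [List.getElem?_eq_getElem hks]
        rfl
  rw [hA]
  -- ds and its properties
  set ds := PySem.List.sorted zs (fun p => p.1) false with hds
  have hperm : ds.Perm zs := PySem.List.sorted_perm zs (fun p => p.1) false
  have hndpos : positions.Nodup := by
    rw [List.Nodup]
    exact hdist
  have hfst : zs.map Prod.fst = positions := List.map_fst_zip (by rw [hpos]; simpa using hlen)
  have hndz : (zs.map Prod.fst).Nodup := by rw [hfst]; exact hndpos
  have hndds : (ds.map Prod.fst).Nodup := by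
    rw [List.Perm.nodup_iff (List.Perm.map Prod.fst hperm)]
    exact hndz
  have hinc : (ds.map Prod.fst).Pairwise (· < ·) := by
    have h1 : ds.Pairwise (fun a b => a.1 ≤ b.1) := PySem.List.sorted_pairwise zs (fun p => p.1)
    have h2 : ds.Pairwise (fun a b => a.1 ≠ b.1) := List.pairwise_map.mp hndds
    rw [List.pairwise_map]
    exact (h1.and h2).imp (fun h => lt_of_le_of_ne h.1 h.2)
  have hdsb : ∀ p ∈ ds, (0 : Int) ≤ p.1 ∧ p.1 < n := by
    intro p hp
    rw [hds, PySem.List.mem_sorted] at hp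
    have := (List.of_mem_zip (by rw [← hzs]; exact hp)).1
    exact hposb p.1 this
  -- nodup on the Nat side for pvApply_perm
  have hndN : ((zs.map (fun p => (p.1.toNat, p.2))).map Prod.fst).Nodup := by
    rw [List.map_map]
    have : (Prod.fst ∘ fun p : Int × String => (p.1.toNat, p.2)) = (fun p : Int × String => p.1.toNat) := rfl
    rw [this]
    have hmm : (zs.map fun p : Int × String => p.1.toNat) = (zs.map Prod.fst).map Int.toNat := by
      rw [List.map_map]; rfl
    rw [hmm, hfst, List.Nodup]
    rw [List.pairwise_map]
    refine (List.Pairwise.and ?_ ?_ : List.Pairwise (fun a b => (0 ≤ a ∧ a < n ∧ 0 ≤ b ∧ b < n) ∧ a ≠ b) positions).imp ?_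
    · refine List.Pairwise.imp_of_mem ?_ (List.pairwise_of_forall_mem_list ?_ : positions.Pairwise (fun a b => True))
      · intro a b ha hb _
        exact ⟨(hposb a ha).1, (hposb a ha).2, (hposb b hb).1, (hposb b hb).2⟩
      · intro a _ b _; trivial
    · exact hndpos
    · intro a b h
      omega
  have hpermN : (zs.map (fun p => (p.1.toNat, p.2))).Perm (ds.map (fun p => (p.1.toNat, p.2))) :=
    List.Perm.map _ hperm.symm
  rw [pvApply_perm _ _ _ hpermN hndN]
  -- A side rendered
  have hAr : pvFlat ((pvApply (ds.map (fun p => (p.1.toNat, p.2))) L0).drop 0) = pvRender wtl ds 0 := by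
    apply pvApply_render wtl ds 0 hinc
    intro p hp
    have := hdsb p hp
    constructor <;> [omega; exact this.2]
  rw [List.drop_zero] at hAr
  rw [hL0] at hAr ⊢
  rw [hAr]
  -- B side
  have hB := pvStitch_render wt ds [] 0 (by omega) (fun p hp => (hdsb p hp).1)
  rw [hB]
  simp only [pvFlat, List.map_nil, List.flatten_nil, List.nil_append, Int.toNat_zero, hwtl]

-- an append-accumulating fold only depends on the per-element value
theorem pvFoldlSnoc {β γ : Type} (muts : List β) (f g : β → γ) (acc : List γ)
    (h : ∀ s ∈ muts, f s = g s) :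
    muts.foldl (fun a s => a ++ [f s]) acc = muts.foldl (fun a s => a ++ [g s]) acc := by
  induction muts generalizing acc with
  | nil => rfl
  | cons s tl ih =>
    simp only [List.foldl_cons]
    rw [h s List.mem_cons_self, ih _ (fun t ht => h t (List.mem_cons_of_mem _ ht))]

-- ===== VERDICT (by name: the statement is the Claim_ definition above) =====
theorem map_mutated_residues_spec : Claim_equal_map_mutated_residues := by
  intro sel muts wt _ hpre
  unfold Spec_map_mutated_residues map_mutated_residues map_mutated_residues_alt
  apply pvFoldlSnoc
  intro seq hseq
  obtain ⟨hidx, hlen, hdist⟩ := hpre seq hseq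
  exact pvSeqEq sel seq wt hidx hlen hdist
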